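-- pv_equiv track=rewrite | github.com/tongjingqi/Game-RL | lifegame/generate_dataset.py | is_region_stable
-- ===== SOURCE A (Python) =====
-- from typing import List, Dict, Tuple, Any , Optional
--
-- def will_change(region: List[List[int]], row: int, col: int) -> Tuple[bool, str, int]:
--     """
--     检查给定位置的细胞在下一步是否会改变状态
--
--     Returns:
--         Tuple[bool, str, int]: (是否会改变, 原因, 活邻居数量)
--     """
--     size = len(region)
--     current_state = region[row][col]
--     neighbors = 0
--
--     # 计算邻居数量
--     for dr in [-1, 0, 1]:
--         for dc in [-1, 0, 1]:
--             if dr == 0 and dc == 0: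
--                 continue
--             nr = (row + dr) % size
--             nc = (col + dc) % size
--             neighbors += region[nr][nc]
--
--     if current_state == 1:  # 活细胞
--         if neighbors < 2:
--             return True, "underpopulation", neighbors
--         elif neighbors > 3:
--             return True, "overpopulation", neighbors
--         else:
--             return False, "survival", neighbors
--     else:  # 死细胞
--         if neighbors == 3:
--             return True, "reproduction", neighbors
--         else:
--             return False, "remains dead", neighbors
--
-- def is_region_stable(region: List[List[int]]) -> bool:
--     """检查区域是否达到稳定状态"""
--     size = len(region)
--     for i in range(size):
--         for j in range(size):
--             will_change_state, _, _ = will_change(region, i, j)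
--             if will_change_state:
--                 return False
--     return True
-- ===== SOURCE B (Python) =====
-- OFFSETS = [(-1, -1), (-1, 0), (-1, 1), (0, -1), (0, 1), (1, -1), (1, 0), (1, 1)]
--
-- def is_region_stable(region):
--     """Materialize the next generation and compare it with the current grid."""
--     size = len(region)
--     nxt = []
--     for i in range(size):
--         row = []
--         for j in range(size):
--             n = sum(region[(i + dr) % size][(j + dc) % size] for dr, dc in OFFSETS)
--             cur = region[i][j]
--             row.append(1 if (n == 3 or (cur == 1 and n == 2)) else (0 if cur == 1 else cur))
--         nxt.append(row)
--     return nxt == region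
-- ===== Notes on version B (the rewrite author's own statement) =====
-- stated objective: alternative
-- what changed: B materializes the full next-generation grid (neighbor sums via a flat 8-offset table, next value preserved for non-live cells) and returns next == region, replacing A's short-circuiting per-cell will_change scan with helper triples.
-- outside the precondition, e.g. on is_region_stable([[0, 1, 0, 0], [1, 1, 0, 0], [0, 0, 0], [0, 0, 0, 0]]): A returns False, B raises IndexError; on is_region_stable([[0, 0, 1]]): A returns True, B returns False
import Mathlib
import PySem

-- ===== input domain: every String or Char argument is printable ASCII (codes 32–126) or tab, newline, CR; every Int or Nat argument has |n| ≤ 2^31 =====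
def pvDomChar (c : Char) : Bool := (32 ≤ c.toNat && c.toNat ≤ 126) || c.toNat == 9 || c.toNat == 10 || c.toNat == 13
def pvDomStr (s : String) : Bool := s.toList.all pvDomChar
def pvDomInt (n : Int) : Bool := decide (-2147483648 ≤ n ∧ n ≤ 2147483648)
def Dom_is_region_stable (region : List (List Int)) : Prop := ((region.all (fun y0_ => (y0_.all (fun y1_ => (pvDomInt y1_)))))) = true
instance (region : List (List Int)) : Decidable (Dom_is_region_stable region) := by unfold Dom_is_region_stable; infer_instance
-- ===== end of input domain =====

-- B materializes the next-generation grid and compares it with the region, instead of A's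
-- short-circuiting per-cell will_change scan; same asymptotic cost (alternative decomposition).


-- shared primitive: region[r][c] (both Pythons read cells exactly like this; in range under Pre_)
def pvCell (region : List (List Int)) (r c : Int) : Int :=
  PySem.List.pyGetD (PySem.List.pyGetD region r []) c 0

-- ===== PORT A =====
def will_change (region : List (List Int)) (row col : Int) : Bool × String × Int :=
  let size : Int := (region.length : Int)
  let current_state := pvCell region row col
  let neighbors :=
    List.foldl (fun acc dr =>
      List.foldl (fun acc dc =>
        if dr == 0 && dc == 0 then acc
        else acc + pvCell region (PySem.Int.mod (row + dr) size) (PySem.Int.mod (col + dc) size))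
        acc [-1, 0, 1])
      0 [(-1 : Int), 0, 1]
  if current_state == 1 then
    if neighbors < 2 then (true, "underpopulation", neighbors)
    else if neighbors > 3 then (true, "overpopulation", neighbors)
    else (false, "survival", neighbors)
  else
    if neighbors == 3 then (true, "reproduction", neighbors)
    else (false, "remains dead", neighbors)

def is_region_stable (region : List (List Int)) : Bool :=
  let size : Int := (region.length : Int)
  (PySem.List.pyRange 0 size 1).all fun i =>
    (PySem.List.pyRange 0 size 1).all fun j =>
      !(will_change region i j).1

-- ===== PORT B =====
def pvOFFSETS : List (Int × Int) :=
  [(-1, -1), (-1, 0), (-1, 1), (0, -1), (0, 1), (1, -1), (1, 0), (1, 1)]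

def next_cell (region : List (List Int)) (size i j : Int) : Int :=
  let n := (pvOFFSETS.map (fun p =>
    pvCell region (PySem.Int.mod (i + p.1) size) (PySem.Int.mod (j + p.2) size))).sum
  let cur := pvCell region i j
  if n == 3 || (cur == 1 && n == 2) then 1 else if cur == 1 then 0 else cur

def is_region_stable_alt (region : List (List Int)) : Bool :=
  let size : Int := (region.length : Int)
  let nxt := (PySem.List.pyRange 0 size 1).map fun i =>
    (PySem.List.pyRange 0 size 1).map fun j => next_cell region size i j
  nxt == region

-- ===== PRECONDITION & SPEC =====
-- Pre_ restricts to square grids (every row as long as the region): on ragged regions A raises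
-- IndexError or returns a value shaped by its short-circuit scan / by columns it never reads,
-- where B's materialize-then-compare naturally raises or differs.
def Pre_is_region_stable (region : List (List Int)) : Prop :=
  ∀ row ∈ region, row.length = region.length
instance (region : List (List Int)) : Decidable (Pre_is_region_stable region) := by
  unfold Pre_is_region_stable; infer_instance

def pvWitness_is_region_stable : List (List Int) := [[1, 1], [1, 1]]

def Spec_is_region_stable (region : List (List Int)) (out : Bool) : Prop :=
  out = is_region_stable_alt region
instance (region : List (List Int)) (out : Bool) : Decidable (Spec_is_region_stable region out) := by
  unfold Spec_is_region_stable; infer_instance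

-- ===== CLAIM (what is proved, stated in full; the proofs are below) =====
def Claim_equal_is_region_stable : Prop := ∀ (region : List (List Int)), Dom_is_region_stable region → Pre_is_region_stable region → Spec_is_region_stable region (is_region_stable region)

-- ===== LEMMAS AND PROOFS =====

-- A's skip-(0,0) double loop computes the same sum as B's flat 8-offset table.
lemma sums_eq (g : Int → Int → Int) :
    List.foldl (fun acc dr =>
      List.foldl (fun acc dc => if dr == 0 && dc == 0 then acc else acc + g dr dc)
        acc [-1, 0, 1]) 0 [(-1 : Int), 0, 1]
    = (pvOFFSETS.map (fun p => g p.1 p.2)).sum := by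
  simp [pvOFFSETS, List.foldl]
  ring

-- per-cell: A's cell does not change iff B's next value equals the current value
lemma cell_eq (region : List (List Int)) (i j : Int) :
    (!(will_change region i j).1)
    = (next_cell region (region.length : Int) i j == pvCell region i j) := by
  have h := sums_eq (fun dr dc =>
    pvCell region (PySem.Int.mod (i + dr) (region.length : Int))
      (PySem.Int.mod (j + dc) (region.length : Int)))
  simp only [will_change, next_cell]
  rw [h]
  set n := (pvOFFSETS.map (fun p =>
    pvCell region (PySem.Int.mod (i + p.1) (region.length : Int))
      (PySem.Int.mod (j + p.2) (region.length : Int)))).sum with hn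
  set cur := pvCell region i j with hc
  by_cases h1 : cur = 1 <;> split_ifs <;> simp_all <;> omega

-- region[r][c] under in-range Nat indices
lemma pvCell_get (region : List (List Int)) (k l : Nat) (hk : k < region.length)
    (hl : l < (region[k]).length) :
    pvCell region (k : Int) (l : Int) = region[k][l] := by
  simp [pvCell, PySem.List.pyGetD_natCast, List.getD_eq_getElem?_getD, hk, hl]

-- the materialized grid equals the region iff every next value equals the current one
lemma grid_eq (region : List (List Int)) (hPre : Pre_is_region_stable region) :
    ((PySem.List.pyRange 0 (region.length : Int) 1).map fun i =>
      (PySem.List.pyRange 0 (region.length : Int) 1).map fun j =>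
        next_cell region (region.length : Int) i j) = region
    ↔ (∀ i : Int, 0 ≤ i → i < (region.length : Int) → ∀ j : Int, 0 ≤ j → j < (region.length : Int) →
        next_cell region (region.length : Int) i j = pvCell region i j) := by
  have hrow : ∀ k (hk : k < region.length), (region[k]).length = region.length := by
    intro k hk; exact hPre _ (List.getElem_mem hk)
  constructor
  · intro h i hi0 hi j hj0 hj
    have hk : i.toNat < region.length := by omega
    have hl : j.toNat < region.length := by omega
    have hkc : (i.toNat : Int) = i := Int.toNat_of_nonneg hi0
    have hlc : (j.toNat : Int) = j := Int.toNat_of_nonneg hj0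
    have h1 := List.getElem_of_eq h (i := i.toNat)
      (by simp [PySem.List.length_pyRange_one]; omega)
    rw [List.getElem_map, PySem.List.getElem_pyRange_one, zero_add, hkc] at h1
    have h2 := List.getElem_of_eq h1 (i := j.toNat)
      (by simp [PySem.List.length_pyRange_one]; omega)
    rw [List.getElem_map, PySem.List.getElem_pyRange_one, zero_add, hlc] at h2
    rw [h2, ← pvCell_get region i.toNat j.toNat hk (by rw [hrow _ hk]; exact hl), hkc, hlc]
  · intro h
    apply List.ext_getElem
    · simp [PySem.List.length_pyRange_one]
    · intro k h1 h2
      rw [List.getElem_map, PySem.List.getElem_pyRange_one, zero_add]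
      apply List.ext_getElem
      · simp [PySem.List.length_pyRange_one, hrow _ h2]
      · intro l h3 h4
        rw [List.getElem_map, PySem.List.getElem_pyRange_one, zero_add]
        have h5 : l < region.length := by
          have := hrow _ h2; omega
        rw [h _ (by positivity) (by exact_mod_cast h2) _ (by positivity) (by exact_mod_cast h5)]
        exact pvCell_get region k l h2 h4

-- ===== VERDICT (by name: the statement is the Claim_ definition above) =====
theorem is_region_stable_spec : Claim_equal_is_region_stable := by
  intro region _ hPre
  unfold Spec_is_region_stable
  rw [Bool.eq_iff_iff]
  simp only [is_region_stable, is_region_stable_alt, List.all_eq_true,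
    PySem.List.mem_pyRange_one, beq_iff_eq, grid_eq region hPre]
  constructor
  · intro h i hi0 hi j hj0 hj
    have := h i ⟨hi0, hi⟩ j ⟨hj0, hj⟩
    rw [cell_eq] at this
    exact beq_iff_eq.mp this
  · intro h i hi j hj
    rw [cell_eq]
    exact beq_iff_eq.mpr (h i hi.1 hi.2 j hj.1 hj.2)
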